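-- pv_equiv track=rewrite | github.com/clover3/Chair | src/taskman_client/cloverweb_man/cloverweb_common.py | parse_ip
-- ===== SOURCE A (Python) =====
-- def parse_ip(s: str):
--     pattern = "Instance external IP is "
--     ip = None
--     for line in s.split("\n"):
--         if line.startswith(pattern):
--             ip = line[len(pattern):].strip()
--             break
--     if ip is None:
--         raise Exception()
--
--     return ip
-- ===== SOURCE B (Python) =====
-- def parse_ip(s: str):
--     # One substring search instead of splitting into lines and testing each:
--     # the first line starting with the pattern is exactly the first occurrence
--     # of "\n" + pattern in "\n" + s.
--     pattern = "Instance external IP is "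
--     marker = "\n" + pattern
--     t = "\n" + s
--     i = t.find(marker)
--     if i < 0:
--         raise Exception()
--     rest = t[i + len(marker):]
--     end = rest.find("\n")
--     if end >= 0:
--         rest = rest[:end]
--     return rest.strip()
-- ===== Notes on version B (the rewrite author's own statement) =====
-- stated objective: alternative
-- what changed: B replaces the split-into-lines loop with a single substring search: the first line starting with the pattern is located as the first occurrence of the newline-prefixed pattern inside the newline-prefixed input, then the remainder of that line is cut at the next line break and stripped; both implementations raise when no line matches.
import Mathlib
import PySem

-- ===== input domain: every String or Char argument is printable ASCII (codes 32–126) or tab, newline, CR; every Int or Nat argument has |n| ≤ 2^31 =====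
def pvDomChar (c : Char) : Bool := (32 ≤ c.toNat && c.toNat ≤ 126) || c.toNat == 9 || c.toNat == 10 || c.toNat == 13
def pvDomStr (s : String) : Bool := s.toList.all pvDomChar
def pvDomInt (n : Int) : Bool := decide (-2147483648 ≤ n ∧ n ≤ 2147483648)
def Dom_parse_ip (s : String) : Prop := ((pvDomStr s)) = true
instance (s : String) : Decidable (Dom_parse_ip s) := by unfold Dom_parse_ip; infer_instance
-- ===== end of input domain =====

-- B replaces A's split-into-lines + startswith loop by a single substring search
-- for "\n"+pattern in "\n"+s (alternative decomposition, same cost).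


-- pattern = "Instance external IP is "  (shared literal constant of both Pythons)
def pvPat : List Char := "Instance external IP is ".toList

-- ===== PORT A =====
-- the for-loop with break: first line that startswith the pattern, else None
def pvFirstMatch : List (List Char) → Option (List Char)
  | [] => none
  | l :: ls =>
    if PySem.Chars.startswith l pvPat then
      -- line[len(pattern):].strip()  (slice line[24:] with nonnegative start = drop 24, exact)
      some (PySem.Chars.strip (l.drop 24))
    else pvFirstMatch ls

def parse_ip (s : String) : String :=
  match pvFirstMatch (PySem.Chars.splitOn s.toList ['\n']) with
  | some ip => String.mk ip
  | none => ""   -- raise Exception(): excluded by Pre_parse_ip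

-- ===== PORT B =====
def parse_ip_alt (s : String) : String :=
  let t := '\n' :: s.toList            -- t = "\n" + s
  let marker := '\n' :: pvPat          -- marker = "\n" + pattern
  let i := PySem.Chars.find t marker   -- i = t.find(marker)
  if i < 0 then ""                     -- raise Exception(): excluded by Pre_parse_ip
  else
    -- rest = t[i + len(marker):]  (slice with nonnegative start = drop, exact: both clamp past the end)
    let rest := t.drop (i.toNat + 25)
    let e := PySem.Chars.find rest ['\n']   -- end = rest.find("\n")
    -- rest = rest[:end] if end >= 0  (slice with nonnegative bound = take, exact)
    let rest := if 0 ≤ e then rest.take e.toNat else rest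
    String.mk (PySem.Chars.strip rest)      -- rest.strip()

-- ===== PRECONDITION & SPEC =====
-- Pre_ excludes exactly the inputs on which A raises Exception: no line of s starts with the pattern.
def Pre_parse_ip (s : String) : Prop :=
  ∃ l ∈ PySem.Chars.splitOn s.toList ['\n'], PySem.Chars.startswith l pvPat = true
instance (s : String) : Decidable (Pre_parse_ip s) := by unfold Pre_parse_ip; infer_instance
def pvWitness_parse_ip : String := "Instance external IP is 1.2.3.4"
def Spec_parse_ip (s : String) (out : String) : Prop := out = parse_ip_alt s
instance (s : String) (out : String) : Decidable (Spec_parse_ip s out) := by unfold Spec_parse_ip; infer_instance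

-- ===== CLAIM (what is proved, stated in full; the proofs are below) =====
def Claim_equal_parse_ip : Prop := ∀ (s : String), Dom_parse_ip s → Pre_parse_ip s → Spec_parse_ip s (parse_ip s)

-- ===== LEMMAS AND PROOFS =====

-- reference line decomposition: the lines of cs split at '\n'
def pvConsHead (p : List Char) : List (List Char) → List (List Char)
  | [] => [p]
  | x :: xs => (p ++ x) :: xs

def pvLines : List Char → List (List Char)
  | [] => [[]]
  | c :: t => if c = '\n' then [] :: pvLines t else pvConsHead [c] (pvLines t)

theorem pvLines_ne_nil (cs : List Char) : pvLines cs ≠ [] := by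
  cases cs with
  | nil => simp [pvLines]
  | cons c t =>
    simp only [pvLines]
    split
    · simp
    · cases h : pvLines t <;> simp [pvConsHead]

theorem pvConsHead_nil (ls : List (List Char)) (h : ls ≠ []) : pvConsHead [] ls = ls := by
  cases ls with
  | nil => exact absurd rfl h
  | cons x xs => simp [pvConsHead]

theorem pvConsHead_consHead (p q : List Char) (ls : List (List Char)) :
    pvConsHead p (pvConsHead q ls) = pvConsHead (p ++ q) ls := by
  cases ls <;> simp [pvConsHead]

theorem pv_isPrefixOf_nl_false (c : Char) (t : List Char) (hc : c ≠ '\n') :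
    List.isPrefixOf ['\n'] (c :: t) = false := by
  rw [Bool.eq_false_iff]
  intro hp
  exact hc (List.cons_prefix_cons.mp (List.isPrefixOf_iff_prefix.mp hp)).1.symm

-- splitOn.go computes pvLines (the initial fuel suffices)
theorem pv_go_spec (fuel : Nat) : ∀ (l cur : List Char) (acc : List (List Char)),
    l.length < fuel →
    PySem.Chars.splitOn.go ['\n'] fuel l cur acc
      = acc.reverse ++ pvConsHead cur.reverse (pvLines l) := by
  induction fuel with
  | zero => intro l cur acc h; omega
  | succ f ih =>
    intro l cur acc h
    cases l with
    | nil => simp [PySem.Chars.splitOn.go, pvLines, pvConsHead]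
    | cons c t =>
      by_cases hc : c = '\n'
      · subst hc
        rw [PySem.Chars.splitOn.go]
        have hpre : List.isPrefixOf ['\n'] ('\n' :: t) = true :=
          List.isPrefixOf_iff_prefix.mpr (by simp [List.cons_prefix_cons])
        simp only [hpre, if_true, List.length_cons, List.length_nil, List.drop_succ_cons,
          List.drop_zero]
        rw [ih t [] _ (by simpa using Nat.lt_of_succ_lt_succ h),
            List.reverse_nil, pvConsHead_nil _ (pvLines_ne_nil t)]
        simp [pvLines, pvConsHead]
      · rw [PySem.Chars.splitOn.go]
        simp only [pv_isPrefixOf_nl_false c t hc, Bool.false_eq_true, if_false]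
        rw [ih t (c :: cur) acc (by simpa using Nat.lt_of_succ_lt_succ h)]
        simp [pvLines, hc, pvConsHead_consHead]

theorem pv_splitOn_eq_lines (cs : List Char) :
    PySem.Chars.splitOn cs ['\n'] = pvLines cs := by
  rw [PySem.Chars.splitOn, pv_go_spec (cs.length + 1) cs [] [] (by omega)]
  simp [pvConsHead_nil _ (pvLines_ne_nil cs)]

theorem pvLines_no_nl (cs : List Char) (h : '\n' ∉ cs) : pvLines cs = [cs] := by
  induction cs with
  | nil => rfl
  | cons c t ih =>
    simp only [List.mem_cons, not_or] at h
    have hc : ¬ c = '\n' := fun hc => h.1 hc.symm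
    simp [pvLines, hc, ih h.2, pvConsHead]

theorem pvLines_append (a b : List Char) (h : '\n' ∉ a) :
    pvLines (a ++ '\n' :: b) = a :: pvLines b := by
  induction a with
  | nil => simp [pvLines]
  | cons c t ih =>
    simp only [List.mem_cons, not_or] at h
    have hc : ¬ c = '\n' := fun hc => h.1 hc.symm
    simp only [List.cons_append, pvLines, hc, if_false, ih h.2]
    simp [pvConsHead]

-- find = k when the first occurrence is at k
theorem pv_find_eq (s sub : List Char) (k : Nat) (hk : sub <+: s.drop k)
    (hmin : ∀ i < k, ¬ sub <+: s.drop i) : PySem.Chars.find s sub = (k : Int) := by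
  have hinf : sub <:+: s := ((hk.isInfix).trans (List.drop_suffix k s).isInfix)
  have h0 : 0 ≤ PySem.Chars.find s sub := (PySem.Chars.find_nonneg_iff s sub).mpr hinf
  obtain ⟨hocc, hmin'⟩ := PySem.Chars.find_spec h0
  have h1 : ¬ (PySem.Chars.find s sub).toNat < k := fun hlt => hmin _ hlt hocc
  have h2 : ¬ k < (PySem.Chars.find s sub).toNat := fun hlt => hmin' _ hlt hk
  omega

theorem pv_find_eq_neg_one (s sub : List Char) (h : ∀ j : Nat, ¬ sub <+: s.drop j) :
    PySem.Chars.find s sub = -1 := by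
  rw [PySem.Chars.find_eq_neg_one_iff]
  intro hinf
  have : PySem.Chars.isIn sub s = true := (PySem.Chars.isIn_iff_infix sub s).mpr hinf
  obtain ⟨j, hj⟩ := (PySem.Chars.exists_prefix_drop_iff_isIn sub s).mpr this
  exact h j hj

theorem pv_pat_facts : pvPat.length = 24 ∧ '\n' ∉ pvPat := by decide

-- find of "\n" in a newline-free list is -1
theorem pv_find_nl_free (a : List Char) (h : '\n' ∉ a) :
    PySem.Chars.find a ['\n'] = -1 := by
  refine pv_find_eq_neg_one _ _ ?_
  intro j hpre
  rcases hpre with ⟨t, ht⟩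
  have hm : '\n' ∈ List.drop j a := by rw [← ht]; simp
  exact h (List.mem_of_mem_drop hm)

-- a prefix not containing '\n' of a ++ '\n' :: b is a prefix of a
theorem pv_prefix_through (p a b : List Char) (hp : '\n' ∉ p) (hpre : p <+: a ++ '\n' :: b) :
    p <+: a := by
  rcases List.prefix_or_prefix_of_prefix hpre (List.prefix_append a ('\n' :: b)) with h | h
  · exact h
  · rcases h with ⟨r, hr⟩
    subst hr
    rcases r with _ | ⟨c, r'⟩
    · simp
    · rcases (List.prefix_append_right_inj a).mp hpre with ⟨t, ht⟩
      have hc : c = '\n' := by simpa using congrArg List.head? ht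
      exact absurd (by simp [hc]) hp

-- no occurrence of '\n'::pvPat starts within the first (newline-free, non-matching) line
theorem pv_no_occ_early (a b : List Char) (ha : '\n' ∉ a) (hns : ¬ pvPat <+: a) :
    ∀ j : Nat, j ≤ a.length → ¬ ('\n' :: pvPat) <+: ('\n' :: (a ++ '\n' :: b)).drop j := by
  intro j hj hpre
  cases j with
  | zero =>
    rw [List.drop_zero, List.cons_prefix_cons] at hpre
    exact hns (pv_prefix_through _ _ _ pv_pat_facts.2 hpre.2)
  | succ m =>
    rw [List.drop_succ_cons] at hpre
    have hm : m < a.length := by omega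
    rw [List.drop_append_of_le_length (le_of_lt hm)] at hpre
    have hda : a.drop m = a[m] :: a.drop (m + 1) := (List.getElem_cons_drop hm).symm
    rw [hda, List.cons_append, List.cons_prefix_cons] at hpre
    exact ha (hpre.1 ▸ List.getElem_mem hm)

-- the Option-level value of port B
def pvBcore (cs : List Char) : Option (List Char) :=
  let i := PySem.Chars.find ('\n' :: cs) ('\n' :: pvPat)
  if i < 0 then none
  else
    let rest := ('\n' :: cs).drop (i.toNat + 25)
    let e := PySem.Chars.find rest ['\n']
    some (PySem.Chars.strip (if 0 ≤ e then rest.take e.toNat else rest))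

theorem pv_alt_eq_core (s : String) :
    parse_ip_alt s = (match pvBcore s.toList with
      | some ip => String.mk ip
      | none => "") := by
  simp only [parse_ip_alt, pvBcore]
  split <;> simp_all

-- dropping past the first line lands in the tail
theorem pv_drop_past (a b : List Char) (m : Nat) :
    ('\n' :: (a ++ '\n' :: b)).drop (a.length + 1 + m) = ('\n' :: b).drop m := by
  have h1 : a.length + 1 + m = (a.length + m) + 1 := by omega
  rw [h1, List.drop_succ_cons, List.drop_append, List.drop_of_length_le (by omega),
      List.nil_append, Nat.add_sub_cancel_left]

-- the matching-line branch: B finds the occurrence at the start of that line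
theorem pv_core_hit (a b : List Char) (ha : '\n' ∉ a) (hs : pvPat <+: a) :
    pvBcore (a ++ '\n' :: b) = some (PySem.Chars.strip (a.drop 24)) := by
  have hfind : PySem.Chars.find ('\n' :: (a ++ '\n' :: b)) ('\n' :: pvPat) = ((0 : Nat) : Int) := by
    refine pv_find_eq _ _ 0 ?_ (by omega)
    rw [List.drop_zero, List.cons_prefix_cons]
    exact ⟨rfl, hs.trans (List.prefix_append a ('\n' :: b))⟩
  obtain ⟨a', ha'⟩ := hs
  have hlen : a.length = 24 + a'.length := by
    have := congrArg List.length ha'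
    simp [pv_pat_facts.1] at this; omega
  have hdropa : a.drop 24 = a' := by
    rw [← ha', ← pv_pat_facts.1, List.drop_append, List.drop_length, List.nil_append,
        Nat.sub_self, List.drop_zero]
  have ha'nl : '\n' ∉ a' := fun h => ha (List.mem_of_mem_drop (hdropa ▸ h))
  have hrest : ('\n' :: (a ++ '\n' :: b)).drop ((((0 : Nat) : Int)).toNat + 25)
      = a' ++ '\n' :: b := by
    have h25 : (((0 : Nat) : Int)).toNat + 25 = 24 + 1 := by simp
    rw [h25, List.drop_succ_cons, List.drop_append, hdropa,
        Nat.sub_eq_zero_of_le (by omega), List.drop_zero]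
  have hfe : PySem.Chars.find (a' ++ '\n' :: b) ['\n'] = ((a'.length : Nat) : Int) := by
    refine pv_find_eq _ _ a'.length ?_ ?_
    · rw [List.drop_append, List.drop_length, List.nil_append, Nat.sub_self, List.drop_zero]
      exact ⟨b, rfl⟩
    · intro i hi hpre
      rw [List.drop_append_of_le_length (le_of_lt hi)] at hpre
      have hda : a'.drop i = a'[i] :: a'.drop (i + 1) := (List.getElem_cons_drop hi).symm
      rw [hda, List.cons_append, List.cons_prefix_cons] at hpre
      exact ha'nl (hpre.1 ▸ List.getElem_mem hi)
  simp only [pvBcore, hfind]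
  rw [if_neg (by omega), hrest, hfe, if_pos (by omega)]
  rw [Int.toNat_natCast, List.take_left, hdropa]

-- the non-matching first line: B's search skips past it
theorem pv_core_skip (a b : List Char) (ha : '\n' ∉ a) (hns : ¬ pvPat <+: a) :
    pvBcore (a ++ '\n' :: b) = pvBcore b := by
  have hearly := pv_no_occ_early a b ha hns
  by_cases hneg : PySem.Chars.find ('\n' :: b) ('\n' :: pvPat) < 0
  · have hm1 : PySem.Chars.find ('\n' :: b) ('\n' :: pvPat) = -1 := by
      have := PySem.Chars.neg_one_le_find ('\n' :: b) ('\n' :: pvPat)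
      omega
    have hnone : PySem.Chars.find ('\n' :: (a ++ '\n' :: b)) ('\n' :: pvPat) = -1 := by
      refine pv_find_eq_neg_one _ _ ?_
      intro j hpre
      by_cases hj : j ≤ a.length
      · exact hearly j hj hpre
      · have h1 : j = a.length + 1 + (j - (a.length + 1)) := by omega
        rw [h1, pv_drop_past] at hpre
        exact ((PySem.Chars.find_eq_neg_one_iff _ _).mp hm1)
          ((hpre.isInfix).trans (List.drop_suffix _ _).isInfix)
    simp [pvBcore, hnone, hm1]
  · rw [not_lt] at hneg
    obtain ⟨hocc, hmin⟩ := PySem.Chars.find_spec hneg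
    have hfval : PySem.Chars.find ('\n' :: b) ('\n' :: pvPat)
        = ((PySem.Chars.find ('\n' :: b) ('\n' :: pvPat)).toNat : Int) := by omega
    set k := (PySem.Chars.find ('\n' :: b) ('\n' :: pvPat)).toNat with hk
    have hfind : PySem.Chars.find ('\n' :: (a ++ '\n' :: b)) ('\n' :: pvPat)
        = ((a.length + 1 + k : Nat) : Int) := by
      refine pv_find_eq _ _ _ (by rw [pv_drop_past]; exact hocc) ?_
      intro i hi hpre
      by_cases hia : i ≤ a.length
      · exact hearly i hia hpre
      · have h1 : i = a.length + 1 + (i - (a.length + 1)) := by omega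
        rw [h1, pv_drop_past] at hpre
        exact hmin _ (by omega) hpre
    have hn1 : ¬ ((a.length + 1 + k : Nat) : Int) < 0 := by omega
    have hn3 : ¬ ((k : Nat) : Int) < 0 := by omega
    simp only [pvBcore, hfind, hfval]
    rw [if_neg hn1, if_neg hn3]
    simp only [Int.toNat_natCast]
    have h2 : a.length + 1 + k + 25 = a.length + 1 + (k + 25) := by omega
    rw [h2, pv_drop_past]

-- the newline-free cases
theorem pv_core_hit_nonl (cs : List Char) (h : '\n' ∉ cs) (hs : pvPat <+: cs) :
    pvBcore cs = some (PySem.Chars.strip (cs.drop 24)) := by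
  have hfind : PySem.Chars.find ('\n' :: cs) ('\n' :: pvPat) = ((0 : Nat) : Int) := by
    refine pv_find_eq _ _ 0 ?_ (by omega)
    rw [List.drop_zero, List.cons_prefix_cons]
    exact ⟨rfl, hs⟩
  have hrest : ('\n' :: cs).drop 25 = cs.drop 24 := by
    have h25 : (25 : Nat) = 24 + 1 := rfl
    rw [h25, List.drop_succ_cons]
  have hnl : '\n' ∉ cs.drop 24 := fun hh => h (List.mem_of_mem_drop hh)
  simp only [pvBcore, hfind]
  rw [if_neg (by omega)]
  have h025 : (((0 : Nat) : Int)).toNat + 25 = 25 := by simp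
  rw [h025, hrest, pv_find_nl_free _ hnl, if_neg (by omega)]

theorem pv_core_none_nonl (cs : List Char) (h : '\n' ∉ cs) (hns : ¬ pvPat <+: cs) :
    pvBcore cs = none := by
  have hnone : PySem.Chars.find ('\n' :: cs) ('\n' :: pvPat) = -1 := by
    refine pv_find_eq_neg_one _ _ ?_
    intro j hpre
    cases j with
    | zero =>
      rw [List.drop_zero, List.cons_prefix_cons] at hpre
      exact hns hpre.2
    | succ m =>
      rw [List.drop_succ_cons] at hpre
      rcases hpre with ⟨t, ht⟩
      have hm : '\n' ∈ List.drop m cs := by rw [← ht]; simp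
      exact h (List.mem_of_mem_drop hm)
  simp [pvBcore, hnone]

-- splitting at the first newline
theorem pv_split_at_nl (cs : List Char) (h : '\n' ∈ cs) :
    ∃ a b, cs = a ++ '\n' :: b ∧ '\n' ∉ a := by
  induction cs with
  | nil => simp at h
  | cons c t ih =>
    by_cases hc : c = '\n'
    · exact ⟨[], t, by simp [hc], by simp⟩
    · have h' : '\n' ∈ t := by
        rcases List.mem_cons.mp h with hh | hh
        · exact absurd hh.symm hc
        · exact hh
      obtain ⟨a, b, h1, h2⟩ := ih h'
      refine ⟨c :: a, b, by simp [h1], ?_⟩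
      simp only [List.mem_cons, not_or]
      exact ⟨fun hh => hc hh.symm, h2⟩

-- main induction: A's first-match over the lines equals B's substring search
theorem pv_main_nonl (cs : List Char) (h : '\n' ∉ cs) :
    pvFirstMatch (pvLines cs) = pvBcore cs := by
  rw [pvLines_no_nl cs h]
  simp only [pvFirstMatch]
  by_cases hs : PySem.Chars.startswith cs pvPat = true
  · rw [if_pos hs, pv_core_hit_nonl cs h (List.isPrefixOf_iff_prefix.mp hs)]
  · rw [if_neg hs, pv_core_none_nonl cs h
      (fun hp => hs (List.isPrefixOf_iff_prefix.mpr hp))]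

theorem pv_main_bounded (n : Nat) : ∀ (cs : List Char), cs.length ≤ n →
    pvFirstMatch (pvLines cs) = pvBcore cs := by
  induction n with
  | zero =>
    intro cs hlen
    have : cs = [] := List.eq_nil_of_length_eq_zero (by omega)
    subst this
    exact pv_main_nonl [] (by simp)
  | succ n ih =>
    intro cs hlen
    by_cases h : '\n' ∈ cs
    · obtain ⟨a, b, rfl, ha⟩ := pv_split_at_nl cs h
      rw [pvLines_append a b ha]
      simp only [pvFirstMatch]
      by_cases hs : PySem.Chars.startswith a pvPat = true
      · rw [if_pos hs, pv_core_hit a b ha (List.isPrefixOf_iff_prefix.mp hs)]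
      · rw [if_neg hs, pv_core_skip a b ha (fun hp => hs (List.isPrefixOf_iff_prefix.mpr hp)),
            ih b (by simp at hlen; omega)]
    · exact pv_main_nonl cs h

theorem pv_main (cs : List Char) : pvFirstMatch (pvLines cs) = pvBcore cs :=
  pv_main_bounded cs.length cs (le_refl _)

-- ===== VERDICT (by name: the statement is the Claim_ definition above) =====
theorem parse_ip_spec : Claim_equal_parse_ip := by
  intro s _ _
  unfold Spec_parse_ip
  rw [pv_alt_eq_core, parse_ip, pv_splitOn_eq_lines, pv_main]
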